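-- pv_equiv track=rewrite | github.com/Lupercio421/CodePath_summer_22 | algorithm_analysis.py | anagramSolution1
-- ===== SOURCE A (Python) =====
-- def anagramSolution1(s1, s2):
--     alist = list(s2)
--
--     pos1 = 0
--     stillOk = True
--
--     while pos1 < len(s1) and stillOk:
--         pos2 = 0
--         found = False
--         while pos2 < len(alist) and not found:
--             if s1[pos1] == alist[pos2]:
--                 found = True
--             else:
--                 pos2 = pos2 + 1
--         if found:
--             alist[pos2] = None
--         else:
--             stillOk = False
--
--         pos1 = pos1 + 1
--
--     return stillOk
-- ===== SOURCE B (Python) =====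
-- def anagramSolution1(s1, s2):
--     # Count s2's characters once, then consume counts in one pass over s1.
--     counts = {}
--     for ch in s2:
--         counts[ch] = counts.get(ch, 0) + 1
--     for ch in s1:
--         c = counts.get(ch, 0)
--         if c == 0:
--             return False
--         counts[ch] = c - 1
--     return True
-- ===== Notes on version B (the rewrite author's own statement) =====
-- stated objective: faster
-- what changed: replaced the nested scan-and-blank search over a copy of s2 by a dict counter of s2 built once and decremented in a single pass over s1
import Mathlib
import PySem

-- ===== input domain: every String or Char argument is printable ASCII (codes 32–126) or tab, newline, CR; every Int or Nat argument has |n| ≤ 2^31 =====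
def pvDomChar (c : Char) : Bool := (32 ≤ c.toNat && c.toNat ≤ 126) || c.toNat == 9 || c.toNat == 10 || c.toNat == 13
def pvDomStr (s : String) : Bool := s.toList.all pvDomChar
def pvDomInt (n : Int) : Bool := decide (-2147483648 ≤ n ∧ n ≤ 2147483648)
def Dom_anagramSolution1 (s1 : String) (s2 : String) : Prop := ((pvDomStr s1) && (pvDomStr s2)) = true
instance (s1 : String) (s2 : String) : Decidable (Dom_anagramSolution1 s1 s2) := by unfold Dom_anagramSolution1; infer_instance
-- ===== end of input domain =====

-- B replaces A's nested scan-and-blank search over a copy of s2 by a character counter of s2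
-- built once and decremented in a single pass over s1 (objective: faster, O(n+m) vs O(n*m)).

-- ===== PORT A =====
-- inner while loop of A: scan alist for the first cell equal to s1[pos1];
-- if found, blank it (alist[pos2] = None) and return the updated list, else none
def pvFindBlank (c : Char) : List (Option Char) → Option (List (Option Char))
  | [] => none
  | x :: xs =>
    if x = some c then some (none :: xs)
    else
      match pvFindBlank c xs with
      | some ys => some (x :: ys)
      | none => none

-- outer while loop of A over pos1 / stillOk
def pvOuterA : List Char → List (Option Char) → Bool
  | [], _ => true
  | c :: rest, alist =>
    match pvFindBlank c alist with
    | some alist' => pvOuterA rest alist'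
    | none => false

def anagramSolution1 (s1 : String) (s2 : String) : Bool :=
  pvOuterA s1.toList (s2.toList.map some)

-- ===== PORT B =====
-- first loop of B: counts[ch] = counts.get(ch, 0) + 1 over s2
def pvCounts (l : List Char) : PySem.Dict Char Int :=
  l.foldl (fun d ch => d.insert ch (d.getD ch 0 + 1)) PySem.Dict.empty

-- second loop of B: consume one count per character of s1, early False on exhaustion
def pvConsume : List Char → PySem.Dict Char Int → Bool
  | [], _ => true
  | ch :: rest, d =>
    let c := d.getD ch 0
    if c = 0 then false else pvConsume rest (d.insert ch (c - 1))

def anagramSolution1_alt (s1 : String) (s2 : String) : Bool :=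
  pvConsume s1.toList (pvCounts s2.toList)

-- ===== PRECONDITION & SPEC =====
def Spec_anagramSolution1 (s1 : String) (s2 : String) (out : Bool) : Prop := out = anagramSolution1_alt s1 s2
instance (s1 : String) (s2 : String) (out : Bool) : Decidable (Spec_anagramSolution1 s1 s2 out) := by unfold Spec_anagramSolution1; infer_instance

-- ===== CLAIM (what is proved, stated in full; the proofs are below) =====
def Claim_equal_anagramSolution1 : Prop := ∀ (s1 : String) (s2 : String), Dom_anagramSolution1 s1 s2 → Spec_anagramSolution1 s1 s2 (anagramSolution1 s1 s2)

-- ===== LEMMAS AND PROOFS =====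

theorem pvFindBlank_eq_none {c : Char} {l : List (Option Char)} :
    pvFindBlank c l = none ↔ some c ∉ l := by
  induction l with
  | nil => simp [pvFindBlank]
  | cons x xs ih =>
    by_cases hx : x = some c
    · subst hx; simp [pvFindBlank]
    · cases h : pvFindBlank c xs with
      | none =>
        have h1 := ih.mp h
        simp only [pvFindBlank, if_neg hx, h, List.mem_cons]
        constructor
        · intro _ hmem
          rcases hmem with h2 | h2
          · exact hx h2.symm
          · exact h1 h2
        · intro _; trivial
      | some ys =>
        have h1 : (some c) ∈ xs := by
          by_contra hc
          rw [ih.mpr hc] at h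
          cases h
        simp [pvFindBlank, if_neg hx, h, List.mem_cons, h1]

theorem pvFindBlank_count {c : Char} {l l' : List (Option Char)}
    (h : pvFindBlank c l = some l') (x : Char) :
    l.count (some x) = l'.count (some x) + (if x = c then 1 else 0) := by
  induction l generalizing l' with
  | nil => simp [pvFindBlank] at h
  | cons y ys ih =>
    by_cases hy : y = some c
    · simp only [pvFindBlank, if_pos hy] at h
      obtain rfl : none :: ys = l' := Option.some.inj h
      subst hy
      simp only [List.count_cons]
      by_cases hxc : x = c
      · simp [hxc]
      · simp [hxc, Ne.symm hxc]
    · simp only [pvFindBlank, if_neg hy] at h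
      cases h2 : pvFindBlank c ys with
      | none => simp [h2] at h
      | some zs =>
        simp only [h2] at h
        obtain rfl : y :: zs = l' := Option.some.inj h
        have := ih h2
        simp only [List.count_cons]
        omega

theorem pv_bridge (l : List Char) :
    ∀ (alist : List (Option Char)) (d : PySem.Dict Char Int),
      (∀ ch : Char, d.getD ch 0 = (alist.count (some ch) : Int)) →
      pvOuterA l alist = pvConsume l d := by
  induction l with
  | nil => intro _ _ _; rfl
  | cons c rest ih =>
    intro alist d hinv
    cases h : pvFindBlank c alist with
    | none =>
      have hc : d.getD c 0 = 0 := by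
        rw [hinv c, List.count_eq_zero.mpr (pvFindBlank_eq_none.mp h)]
        rfl
      simp [pvOuterA, pvConsume, h, hc]
    | some alist' =>
      have hcnt : alist.count (some c) = alist'.count (some c) + 1 := by
        simpa using pvFindBlank_count h c
      have hc : d.getD c 0 ≠ 0 := by
        rw [hinv c, hcnt]
        push_cast
        omega
      simp only [pvOuterA, pvConsume, h, if_neg hc]
      apply ih
      intro ch
      rw [PySem.Dict.getD_insert]
      by_cases hch : ch = c
      · subst hch
        rw [if_pos rfl, hinv ch, hcnt]
        push_cast; ring
      · have hcc := pvFindBlank_count h ch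
        rw [if_neg hch] at hcc
        rw [if_neg hch, hinv ch, hcc]
        omega

theorem pvCounts_getD (l : List Char) (ch : Char) :
    (pvCounts l).getD ch 0 = (l.count ch : Int) := by
  unfold pvCounts
  rw [PySem.Dict.foldl_insert_getD_add_one_eq_counter, PySem.Dict.getD_counter]

-- ===== VERDICT (by name: the statement is the Claim_ definition above) =====
theorem anagramSolution1_spec : Claim_equal_anagramSolution1 := by
  intro s1 s2 _
  unfold Spec_anagramSolution1 anagramSolution1 anagramSolution1_alt
  apply pv_bridge
  intro ch
  rw [pvCounts_getD]
  congr 1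
  rw [List.count_map_of_injective _ some (fun a b => Option.some.injEq a b ▸ id)]
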